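-- pv_equiv track=rewrite | github.com/fish5421/ds-agent | ai_data_science_team/tools/regex.py | format_recommended_steps
-- ===== SOURCE A (Python) =====
-- def format_recommended_steps(raw_text: str, heading: str = "# Recommended Feature Engineering Steps:") -> str:
--     # Split text by newline and strip leading/trailing whitespace
--     lines = raw_text.strip().split('\n')
--
--     # Remove empty lines from the start
--     while lines and not lines[0].strip():
--         lines.pop(0)
--
--     seen_heading = False
--     new_lines = []
--
--     for line in lines:
--         # If this line *is exactly* the heading, check if we've seen it already
--         if line.strip() == heading:
--             if seen_heading:
--                 # Skip duplicates
--                 continue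
--             else:
--                 seen_heading = True
--         new_lines.append(line)
--
--     # If heading was never seen, prepend it
--     if not seen_heading:
--         new_lines.insert(0, heading)
--
--     return "\n".join(new_lines)
-- ===== SOURCE B (Python) =====
-- def format_recommended_steps(raw_text: str, heading: str = "# Recommended Feature Engineering Steps:") -> str:
--     stripped = raw_text.strip()
--     # after .strip() the only way a blank first line can appear is the whitespace-only input
--     lines = stripped.split('\n') if stripped else []
--
--     def is_heading(line):
--         return line.strip() == heading
--
--     # span: split at the first heading occurrence
--     pre, post = [], list(lines)
--     while post and not is_heading(post[0]):
--         pre.append(post.pop(0))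
--
--     if not post:
--         # heading never occurs: prepend it
--         return '\n'.join([heading] + lines)
--
--     first, rest = post[0], post[1:]
--     # keep the first heading line, drop every later heading line
--     return '\n'.join(pre + [first] + [l for l in rest if not is_heading(l)])
-- ===== Notes on version B (the rewrite author's own statement) =====
-- stated objective: alternative
-- what changed: Replaces A's single stateful pass (seen-flag fold that also pops leading blanks) by a span at the first heading occurrence followed by a filtering pass over the suffix, with the whitespace-only case handled up front instead of by the pop loop.
import Mathlib
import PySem

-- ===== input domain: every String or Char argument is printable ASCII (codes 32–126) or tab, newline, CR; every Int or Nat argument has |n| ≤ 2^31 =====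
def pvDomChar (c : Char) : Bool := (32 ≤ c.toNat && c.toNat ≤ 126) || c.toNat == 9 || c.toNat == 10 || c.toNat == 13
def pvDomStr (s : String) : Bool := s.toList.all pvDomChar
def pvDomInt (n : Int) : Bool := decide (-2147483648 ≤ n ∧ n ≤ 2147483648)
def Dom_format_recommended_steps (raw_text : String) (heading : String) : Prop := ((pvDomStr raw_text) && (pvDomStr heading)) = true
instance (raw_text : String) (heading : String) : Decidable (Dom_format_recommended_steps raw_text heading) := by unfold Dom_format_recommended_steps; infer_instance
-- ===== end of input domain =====

-- ===== PORT A =====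
-- B restructures A's single stateful pass into a span at the first heading plus a filter; return values only.
-- 'raw_text.strip().split("\n")': sep is the non-empty literal "\n", so Python's split never raises;
-- ported as Chars.splitOn on the code points (exactly what PySem.Str.split? computes for this sep).
def pvLinesA (raw_text : String) : List String :=
  (PySem.Chars.splitOn (PySem.Str.strip raw_text).toList ['\n']).map String.ofList

-- 'while lines and not lines[0].strip(): lines.pop(0)'
def pvPopA : List String → List String
  | [] => []
  | l :: rest => if PySem.Str.strip l = "" then pvPopA rest else l :: rest

-- the for-loop over lines with state (seen_heading, new_lines)
def pvLoopA (heading : String) : List String → Bool → List String → Bool × List String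
  | [], seen, acc => (seen, acc)
  | l :: rest, seen, acc =>
    if PySem.Str.strip l = heading then
      if seen then pvLoopA heading rest seen acc
      else pvLoopA heading rest true (acc ++ [l])
    else pvLoopA heading rest seen (acc ++ [l])

def format_recommended_steps (raw_text : String) (heading : String) : String :=
  let lines := pvPopA (pvLinesA raw_text)
  let r := pvLoopA heading lines false []
  let new_lines := if r.1 then r.2 else heading :: r.2  -- new_lines.insert(0, heading)
  PySem.Str.join "\n" new_lines

-- ===== PORT B =====
-- the while/pop span loop of Source B: (pre, post) with post starting at the first heading line
def pvSpanB (heading : String) : List String → List String → List String × List String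
  | pre, [] => (pre, [])
  | pre, l :: post =>
    if PySem.Str.strip l = heading then (pre, l :: post)
    else pvSpanB heading (pre ++ [l]) post

def format_recommended_steps_alt (raw_text : String) (heading : String) : String :=
  let stripped := PySem.Str.strip raw_text
  -- 'stripped.split("\n") if stripped else []'; split ported as in port A (non-empty literal sep)
  let lines := if stripped = "" then []
               else (PySem.Chars.splitOn stripped.toList ['\n']).map String.ofList
  match pvSpanB heading [] lines with
  | (_, []) => PySem.Str.join "\n" (heading :: lines)
  | (pre, first :: rest) =>
      PySem.Str.join "\n" (pre ++ first :: rest.filter (fun l => PySem.Str.strip l != heading))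

-- ===== PRECONDITION & SPEC =====
def Spec_format_recommended_steps (raw_text : String) (heading : String) (out : String) : Prop := out = format_recommended_steps_alt raw_text heading
instance (raw_text : String) (heading : String) (out : String) : Decidable (Spec_format_recommended_steps raw_text heading out) := by unfold Spec_format_recommended_steps; infer_instance

-- ===== CLAIM (what is proved, stated in full; the proofs are below) =====
def Claim_equal_format_recommended_steps : Prop := ∀ (raw_text : String) (heading : String), Dom_format_recommended_steps raw_text heading → Spec_format_recommended_steps raw_text heading (format_recommended_steps raw_text heading)

-- ===== LEMMAS AND PROOFS =====

-- first element of splitOn.go with empty acc starts with cur.reverse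
theorem pv_go_shape (sep : List Char) : ∀ (fuel : Nat) (l cur : List Char) (acc : List (List Char)),
    ∃ r t, PySem.Chars.splitOn.go sep fuel l cur acc = acc.reverse ++ (cur.reverse ++ r) :: t := by
  intro fuel
  induction fuel with
  | zero => intro l cur acc; exact ⟨l, [], by simp [PySem.Chars.splitOn.go]⟩
  | succ n ih =>
    intro l cur acc
    cases l with
    | nil => exact ⟨[], [], by simp [PySem.Chars.splitOn.go]⟩
    | cons c rest =>
      by_cases hp : sep.isPrefixOf (c :: rest) = true
      · obtain ⟨r, t, h⟩ := ih (List.drop sep.length (c :: rest)) [] (cur.reverse :: acc)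
        refine ⟨[], ([] ++ r) :: t, ?_⟩
        simp only [PySem.Chars.splitOn.go, hp, if_pos]
        rw [h]; simp
      · obtain ⟨r, t, h⟩ := ih rest (c :: cur) acc
        refine ⟨c :: r, t, ?_⟩
        simp only [PySem.Chars.splitOn.go, hp, if_neg, Bool.not_eq_true]
        rw [h]; simp

theorem pv_splitOn_cons (c : Char) (rest sep : List Char) (hc : sep.isPrefixOf (c :: rest) = false) :
    ∃ r t, PySem.Chars.splitOn (c :: rest) sep = (c :: r) :: t := by
  unfold PySem.Chars.splitOn
  simp only [PySem.Chars.splitOn.go, List.length_cons, hc]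
  obtain ⟨r, t, h⟩ := pv_go_shape sep (rest.length + 1) rest [c] []
  exact ⟨r, t, by simpa using h⟩

theorem pv_strip_nil_iff (cs : List Char) :
    PySem.Chars.strip cs = [] ↔ cs.all PySem.Chars.isspace := by
  simp only [PySem.Chars.strip, PySem.Chars.rstrip, PySem.Chars.lstrip]
  rw [List.reverse_eq_nil_iff, List.dropWhile_eq_nil_iff, List.all_eq_true]
  constructor
  · intro h x hx
    rw [← List.takeWhile_append_dropWhile (p := PySem.Chars.isspace) (l := cs)] at hx
    rcases List.mem_append.mp hx with h1 | h2
    · exact List.mem_takeWhile_imp h1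
    · exact h x (List.mem_reverse.mpr h2)
  · intro h x hx
    exact h x ((List.dropWhile_sublist PySem.Chars.isspace).subset (List.mem_reverse.mp hx))

-- head of a non-empty stripped string is not whitespace
theorem pv_strip_head (cs : List Char) (c : Char) (t : List Char)
    (h : PySem.Chars.strip cs = c :: t) : PySem.Chars.isspace c = false := by
  -- strip cs is a prefix of lstrip cs, whose head is not whitespace
  have hpre : PySem.Chars.strip cs <+: PySem.Chars.lstrip cs := by
    have hs : (List.dropWhile PySem.Chars.isspace (PySem.Chars.lstrip cs).reverse) <:+
        (PySem.Chars.lstrip cs).reverse := List.dropWhile_suffix _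
    have := List.reverse_prefix.mpr hs
    simpa [PySem.Chars.strip, PySem.Chars.rstrip] using this
  rw [h] at hpre
  rcases hpre with ⟨u, hu⟩
  have hhead : (PySem.Chars.lstrip cs).head? = some c := by rw [← hu]; rfl
  cases hLC : PySem.Chars.lstrip cs with
  | nil => rw [hLC] at hhead; simp at hhead
  | cons c' t' =>
    rw [hLC] at hhead
    have hc : c' = c := by simpa using hhead
    have hLC' : List.dropWhile PySem.Chars.isspace cs = c' :: t' := by
      simpa [PySem.Chars.lstrip] using hLC
    have hw : List.dropWhile PySem.Chars.isspace cs ≠ [] := by simp [hLC']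
    have := List.head_dropWhile_not PySem.Chars.isspace (l := cs) (w := hw)
    rw [← hc]
    simpa [hLC'] using this

-- pvPopA on A's line list agrees with B's up-front emptiness test
theorem pv_pop_lines (raw_text : String) :
    pvPopA (pvLinesA raw_text) =
      (if PySem.Str.strip raw_text = "" then []
       else (PySem.Chars.splitOn (PySem.Str.strip raw_text).toList ['\n']).map String.ofList) := by
  by_cases hs : PySem.Str.strip raw_text = ""
  · rw [if_pos hs]
    unfold pvLinesA
    rw [hs]
    decide
  · rw [if_neg hs]
    obtain ⟨c, t, hct⟩ : ∃ c t, (PySem.Str.strip raw_text).toList = c :: t := by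
      cases h : (PySem.Str.strip raw_text).toList with
      | nil =>
        have h1 := congrArg String.ofList h
        rw [String.ofList_toList] at h1
        exact absurd (h1.trans (by decide)) hs
      | cons c t => exact ⟨c, t, rfl⟩
    have hcs : PySem.Chars.strip raw_text.toList = c :: t := by
      rw [← PySem.Str.toList_strip]; exact hct
    have hcsp : PySem.Chars.isspace c = false := pv_strip_head _ _ _ hcs
    have hcn : c ≠ '\n' := by
      intro he; rw [he] at hcsp; exact absurd hcsp (by decide)
    have hnp : List.isPrefixOf ['\n'] (c :: t) = false := by
      simp [List.isPrefixOf]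
      intro h'; exact absurd h'.symm hcn
    obtain ⟨r, t', hsplit⟩ := pv_splitOn_cons c t ['\n'] hnp
    have hne : PySem.Str.strip (String.ofList (c :: r)) ≠ "" := by
      intro he
      have h0 : PySem.Chars.strip (c :: r) = [] := by
        have h1 := congrArg String.toList he
        simpa [PySem.Str.strip] using h1
      rw [pv_strip_nil_iff] at h0
      have h2 := (List.all_eq_true.mp h0) c (by simp)
      rw [hcsp] at h2; exact absurd h2 (by decide)
    unfold pvLinesA
    rw [hct, hsplit]
    simp [pvPopA, hne]

-- the for-loop after the heading has been seen keeps exactly the non-heading lines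
theorem pv_loop_seen (h : String) : ∀ (ls acc : List String),
    pvLoopA h ls true acc = (true, acc ++ ls.filter (fun l => PySem.Str.strip l != h)) := by
  intro ls
  induction ls with
  | nil => intro acc; simp [pvLoopA]
  | cons l rest ih =>
    intro acc
    by_cases hl : PySem.Str.strip l = h
    · simp [pvLoopA, hl, ih]
    · simp [pvLoopA, hl, ih]

-- the whole for-loop, characterised by the span at the first heading line
theorem pv_loop_main (h : String) : ∀ (ls acc : List String),
    pvLoopA h ls false acc =
      (match ls.dropWhile (fun l => PySem.Str.strip l != h) with
       | [] => (false, acc ++ ls)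
       | f :: rest => (true, acc ++ ls.takeWhile (fun l => PySem.Str.strip l != h)
                              ++ f :: rest.filter (fun l => PySem.Str.strip l != h))) := by
  intro ls
  induction ls with
  | nil => intro acc; simp [pvLoopA]
  | cons l rest ih =>
    intro acc
    by_cases hl : PySem.Str.strip l = h
    · simp [pvLoopA, hl, pv_loop_seen]
    · have hq : (PySem.Str.strip l != h) = true := by simp [hl]
      simp only [pvLoopA, if_neg hl, ih (acc ++ [l]),
        List.dropWhile_cons, List.takeWhile_cons, hq, if_true]
      cases rest.dropWhile (fun l => PySem.Str.strip l != h) with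
      | nil => simp
      | cons f r => simp

-- B's span loop is takeWhile/dropWhile
theorem pv_span_eq (h : String) : ∀ (ls pre : List String),
    pvSpanB h pre ls = (pre ++ ls.takeWhile (fun l => PySem.Str.strip l != h),
                        ls.dropWhile (fun l => PySem.Str.strip l != h)) := by
  intro ls
  induction ls with
  | nil => intro pre; simp [pvSpanB]
  | cons l rest ih =>
    intro pre
    by_cases hl : PySem.Str.strip l = h
    · simp [pvSpanB, hl]
    · simp [pvSpanB, hl, ih]

-- ===== VERDICT (by name: the statement is the Claim_ definition above) =====
theorem format_recommended_steps_spec : Claim_equal_format_recommended_steps := by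
  intro raw_text heading _
  unfold Spec_format_recommended_steps
  unfold format_recommended_steps format_recommended_steps_alt
  rw [pv_pop_lines]
  set lines := (if PySem.Str.strip raw_text = "" then []
       else (PySem.Chars.splitOn (PySem.Str.strip raw_text).toList ['\n']).map String.ofList) with hl
  simp only [pv_loop_main, pv_span_eq, List.nil_append]
  cases hdw : lines.dropWhile (fun l => PySem.Str.strip l != heading) with
  | nil =>
    rw [← hl]
    simp
  | cons f rest =>
    rw [← hl]
    simp
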